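-- pv_equiv track=rewrite | github.com/Suchet17/GANs_with_DNA | Simulate/bio_lib.py | re_threecodons
-- ===== SOURCE A (Python) =====
-- codon_of_aa_standard = {'A':["GCA","GCC","GCG","GCT"],\
--                'C':["TGC","TGT"],\
--                'D':["GAC","GAT"],\
--                'E':["GAA","GAG"],\
--                'F':["TTC","TTT"],\
--                'G':["GGA","GGC","GGG","GGT"],\
--                'H':["CAC","CAT"],\
--                'I':["ATA","ATC","ATT"],\
--                'K':["AAA","AAG"],\
--                'L':["TTA","TTG","CTA","CTC","CTG","CTT"],\
--                'M':["ATG"],\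
--                'N':["AAC","AAT"],\
--                'P':["CCA","CCC","CCG","CCT"],\
--                'Q':["CAA","CAG"],\
--                'R':["AGA","AGG","CGA","CGC","CGG","CGT"],\
--                'S':["AGC","AGT","TCA","TCC","TCG","TCT"],\
--                'T':["ACA","ACC","ACG","ACT"],\
--                'V':["GTA","GTC","GTG","GTT"],\
--                'W':["TGG"],\
--                'Y':["TAC","TAT"],\
--                '*':["TAA","TAG","TGA"] } # stop codons
--
-- codon_of_aa_ctg_clade = {}
--
-- def re_threecodons(aastr,codontable="normal"):
--     if codontable=="ctg":
--         codon_of_aa = codon_of_aa_ctg_clade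
--     else:
--         codon_of_aa = codon_of_aa_standard
--     restr = ""
--     for c1 in codon_of_aa[aastr[0]]:
--         for c2 in codon_of_aa[aastr[1]]:
--             for c3 in codon_of_aa[aastr[2]]:
--                 restr += c1+c2+c3+"|"
--     return restr[0:-1]
-- ===== SOURCE B (Python) =====
-- _CODON_DATA = ("A GCA GCC GCG GCT;C TGC TGT;D GAC GAT;E GAA GAG;F TTC TTT;"
--                "G GGA GGC GGG GGT;H CAC CAT;I ATA ATC ATT;K AAA AAG;"
--                "L TTA TTG CTA CTC CTG CTT;M ATG;N AAC AAT;P CCA CCC CCG CCT;"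
--                "Q CAA CAG;R AGA AGG CGA CGC CGG CGT;S AGC AGT TCA TCC TCG TCT;"
--                "T ACA ACC ACG ACT;V GTA GTC GTG GTT;W TGG;Y TAC TAT;* TAA TAG TGA")
--
--
-- def _parse_table(data):
--     table = {}
--     for entry in data.split(";"):
--         fields = entry.split(" ")
--         table[fields[0]] = fields[1:]
--     return table
--
--
-- codon_of_aa_standard = _parse_table(_CODON_DATA)
-- codon_of_aa_ctg_clade = {}
--
--
-- def _expand(codon_of_aa, aas):
--     # all concatenations of one codon per amino acid, built back-to-front
--     if not aas:
--         return [""]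
--     tails = _expand(codon_of_aa, aas[1:])
--     return [c + t for c in codon_of_aa[aas[0]] for t in tails]
--
--
-- def re_threecodons(aastr, codontable="normal"):
--     codon_of_aa = codon_of_aa_ctg_clade if codontable == "ctg" else codon_of_aa_standard
--     return "|".join(_expand(codon_of_aa, [aastr[0], aastr[1], aastr[2]]))
-- ===== Notes on version B (the rewrite author's own statement) =====
-- stated objective: alternative
-- what changed: B stores the codon table as one packed string parsed into a dict at module load and builds the regex by structural recursion over the three amino acids (suffix lists combined back-to-front, joined with '|'), instead of A's literal dict and three nested loops slicing off a trailing bar.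
-- outside the precondition, e.g. on re_threecodons('ctg', 'normal'): A raises KeyError, B raises KeyError
import Mathlib
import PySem

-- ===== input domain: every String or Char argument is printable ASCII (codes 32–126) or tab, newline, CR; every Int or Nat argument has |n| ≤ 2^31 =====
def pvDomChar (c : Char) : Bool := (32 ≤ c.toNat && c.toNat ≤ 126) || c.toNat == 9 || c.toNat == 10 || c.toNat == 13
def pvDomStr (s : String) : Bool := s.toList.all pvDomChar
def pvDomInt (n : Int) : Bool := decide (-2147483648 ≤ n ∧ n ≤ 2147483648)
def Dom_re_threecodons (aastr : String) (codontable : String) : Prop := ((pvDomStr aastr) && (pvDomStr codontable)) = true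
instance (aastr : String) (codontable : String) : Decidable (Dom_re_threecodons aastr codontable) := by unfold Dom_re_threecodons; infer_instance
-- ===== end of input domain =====

-- B stores the codon table as one packed string parsed into a dict and builds the regex by
-- structural recursion (suffix lists, joined with '|') instead of A's literal dict and three
-- nested accumulating loops; objective: alternative decomposition (same cost).

-- ===== PORT A =====
-- the module-level dicts codon_of_aa_standard / codon_of_aa_ctg_clade (codons as List Char)
def codonTableStd : PySem.Dict Char (List (List Char)) :=
  PySem.Dict.ofList [('A', [['G', 'C', 'A'], ['G', 'C', 'C'], ['G', 'C', 'G'], ['G', 'C', 'T']]), ('C', [['T', 'G', 'C'], ['T', 'G', 'T']]), ('D', [['G', 'A', 'C'], ['G', 'A', 'T']]), ('E', [['G', 'A', 'A'], ['G', 'A', 'G']]), ('F', [['T', 'T', 'C'], ['T', 'T', 'T']]), ('G', [['G', 'G', 'A'], ['G', 'G', 'C'], ['G', 'G', 'G'], ['G', 'G', 'T']]), ('H', [['C', 'A', 'C'], ['C', 'A', 'T']]), ('I', [['A', 'T', 'A'], ['A', 'T', 'C'], ['A', 'T', 'T']]), ('K', [['A', 'A', 'A'], ['A', 'A', 'G']]),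 ('L', [['T', 'T', 'A'], ['T', 'T', 'G'], ['C', 'T', 'A'], ['C', 'T', 'C'], ['C', 'T', 'G'], ['C', 'T', 'T']]), ('M', [['A', 'T', 'G']]), ('N', [['A', 'A', 'C'], ['A', 'A', 'T']]), ('P', [['C', 'C', 'A'], ['C', 'C', 'C'], ['C', 'C', 'G'], ['C', 'C', 'T']]), ('Q', [['C', 'A', 'A'], ['C', 'A', 'G']]), ('R', [['A', 'G', 'A'], ['A', 'G', 'G'], ['C', 'G', 'A'], ['C', 'G', 'C'], ['C', 'G', 'G'], ['C', 'G', 'T']]), ('S', [['A', 'G', 'C'], ['A', 'G', 'T'], ['T', 'C', 'A'], ['T', 'C', 'C'], ['T', 'C', 'G'], ['T', 'C', 'T']]), ('T', [['A', 'C', 'A'], ['A', 'C', 'C'], ['A', 'C', 'G'], ['A', 'C', 'T']]), ('V', [['G', 'T', 'A'], ['G', 'T', 'C'], ['G', 'T', 'G'], ['G', 'T', 'T']]), ('W', [['T', 'G', 'G']]), ('Y', [['T', 'A', 'C'], ['T', 'A', 'T']]), ('*', [['T', 'A', 'A'], ['T', 'A', 'G'], ['T', 'G', 'A']])]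

def codonTableCtg : PySem.Dict Char (List (List Char)) := PySem.Dict.empty

-- dict/index lookups are totalised with getD; Pre_ excludes exactly the KeyError/IndexError inputs
def re_threecodons (aastr : String) (codontable : String) : String :=
  let codon_of_aa := if codontable == "ctg" then codonTableCtg else codonTableStd
  let restr : List Char :=
    (PySem.Dict.getD codon_of_aa ((PySem.Str.pyGet? aastr 0).getD ' ') []).foldl (fun r c1 =>
      (PySem.Dict.getD codon_of_aa ((PySem.Str.pyGet? aastr 1).getD ' ') []).foldl (fun r c2 =>
        (PySem.Dict.getD codon_of_aa ((PySem.Str.pyGet? aastr 2).getD ' ') []).foldl (fun r c3 =>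
          r ++ c1 ++ c2 ++ c3 ++ ['|']) r) r) []
  String.ofList (PySem.List.slice restr (some 0) (some (-1)))

-- ===== PORT B =====
-- the packed table string _CODON_DATA
def codonData : List Char :=
  ("A GCA GCC GCG GCT;C TGC TGT;D GAC GAT;E GAA GAG;F TTC TTT;G GGA GGC GGG GGT;H CAC CAT;I ATA ATC ATT;K AAA AAG;L TTA TTG CTA CTC CTG CTT;M ATG;N AAC AAT;P CCA CCC CCG CCT;Q CAA CAG;R AGA AGG CGA CGC CGG CGT;S AGC AGT TCA TCC TCG TCT;T ACA ACC ACG ACT;V GTA GTC GTG GTT;W TGG;Y TAC TAT;* TAA TAG TGA").toList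

-- _parse_table: fields[0] is totalised with getD (never empty on the fixed data)
def parseTable (data : List Char) : PySem.Dict (List Char) (List (List Char)) :=
  (PySem.Chars.splitOn data [';']).foldl (fun table entry =>
    let fields := PySem.Chars.splitOn entry [' ']
    PySem.Dict.insert table ((PySem.List.pyGet? fields 0).getD []) (PySem.List.slice fields (some 1) none))
    PySem.Dict.empty

def codonTableAltStd : PySem.Dict (List Char) (List (List Char)) := parseTable codonData
def codonTableAltCtg : PySem.Dict (List Char) (List (List Char)) := PySem.Dict.empty

-- _expand: structural recursion on the amino-acid list (Python's aas[1:] is the tail)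
def expandAlt (codon_of_aa : PySem.Dict (List Char) (List (List Char))) : List (List Char) → List (List Char)
  | [] => [[]]
  | aa :: rest =>
    let tails := expandAlt codon_of_aa rest
    (PySem.Dict.getD codon_of_aa aa []).flatMap (fun c => tails.map (fun t => c ++ t))

def re_threecodons_alt (aastr : String) (codontable : String) : String :=
  let codon_of_aa := if codontable == "ctg" then codonTableAltCtg else codonTableAltStd
  String.ofList (PySem.Chars.join ['|'] (expandAlt codon_of_aa
    [[(PySem.Str.pyGet? aastr 0).getD ' '], [(PySem.Str.pyGet? aastr 1).getD ' '],
     [(PySem.Str.pyGet? aastr 2).getD ' ']]))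

-- ===== PRECONDITION & SPEC =====
def aaKeys : List Char := ['A','C','D','E','F','G','H','I','K','L','M','N','P','Q','R','S','T','V','W','Y','*']

-- Pre_ excludes exactly the inputs where A raises: codontable "ctg" (empty dict, KeyError),
-- aastr shorter than 3 (IndexError), or a first/second/third character not an amino-acid key (KeyError).
def Pre_re_threecodons (aastr : String) (codontable : String) : Prop :=
  codontable ≠ "ctg" ∧ 3 ≤ aastr.toList.length ∧ ((aastr.toList.take 3).all (fun c => aaKeys.contains c)) = true
instance (aastr : String) (codontable : String) : Decidable (Pre_re_threecodons aastr codontable) := by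
  unfold Pre_re_threecodons; infer_instance

def pvWitness_re_threecodons : String × String := ("MW*", "normal")

def Spec_re_threecodons (aastr : String) (codontable : String) (out : String) : Prop := out = re_threecodons_alt aastr codontable
instance (aastr : String) (codontable : String) (out : String) : Decidable (Spec_re_threecodons aastr codontable out) := by unfold Spec_re_threecodons; infer_instance

-- ===== CLAIM (what is proved, stated in full; the proofs are below) =====
def Claim_equal_re_threecodons : Prop := ∀ (aastr : String) (codontable : String), Dom_re_threecodons aastr codontable → Pre_re_threecodons aastr codontable → Spec_re_threecodons aastr codontable (re_threecodons aastr codontable)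

-- ===== LEMMAS AND PROOFS =====

-- on every amino-acid key the parsed packed table agrees with A's literal dict, nonempty
-- the parse of the packed string, evaluated once
set_option maxRecDepth 40000 in
set_option maxHeartbeats 2000000 in
lemma parsed_table : codonTableAltStd = PySem.Dict.ofList [(['A'], [['G', 'C', 'A'], ['G', 'C', 'C'], ['G', 'C', 'G'], ['G', 'C', 'T']]), (['C'], [['T', 'G', 'C'], ['T', 'G', 'T']]), (['D'], [['G', 'A', 'C'], ['G', 'A', 'T']]), (['E'], [['G', 'A', 'A'], ['G', 'A', 'G']]), (['F'], [['T', 'T', 'C'], ['T', 'T', 'T']]), (['G'], [['G', 'G', 'A'], ['G', 'G', 'C'], ['G', 'G', 'G'], ['G', 'G', 'T']]), (['H'], [['C', 'A', 'C'], ['C', 'A', 'T']]), (['I'], [['A', 'T', 'A'], ['A', 'T', 'C'], ['A', 'T', 'T']]), (['K'], [['A', 'A', 'A'], ['A', 'A', 'G']]), (['L'], [['T', 'T', 'A'], ['T', 'T', 'G'], ['C', 'T', 'A'], ['C', 'T', 'C'], ['C', 'T', 'G'], ['C', 'T', 'T']]), (['M'], [['A', 'T', 'G']]), (['N'], [['A',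 'A', 'C'], ['A', 'A', 'T']]), (['P'], [['C', 'C', 'A'], ['C', 'C', 'C'], ['C', 'C', 'G'], ['C', 'C', 'T']]), (['Q'], [['C', 'A', 'A'], ['C', 'A', 'G']]), (['R'], [['A', 'G', 'A'], ['A', 'G', 'G'], ['C', 'G', 'A'], ['C', 'G', 'C'], ['C', 'G', 'G'], ['C', 'G', 'T']]), (['S'], [['A', 'G', 'C'], ['A', 'G', 'T'], ['T', 'C', 'A'], ['T', 'C', 'C'], ['T', 'C', 'G'], ['T', 'C', 'T']]), (['T'], [['A', 'C', 'A'], ['A', 'C', 'C'], ['A', 'C', 'G'], ['A', 'C', 'T']]), (['V'], [['G', 'T', 'A'], ['G', 'T', 'C'], ['G', 'T', 'G'], ['G', 'T', 'T']]), (['W'], [['T', 'G', 'G']]), (['Y'], [['T', 'A', 'C'], ['T', 'A', 'T']]), (['*'], [['T', 'A', 'A'], ['T', 'A', 'G'], ['T', 'G', 'A']])] := by decide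

lemma alt_lookup : ∀ c ∈ aaKeys,
    PySem.Dict.getD codonTableAltStd [c] [] = PySem.Dict.getD codonTableStd c []
    ∧ PySem.Dict.getD codonTableStd c [] ≠ [] := by
  intro c hc
  rw [parsed_table]
  fin_cases hc <;> exact ⟨by decide, by decide⟩

-- join with '|' is the bar-suffixed concatenation minus its last char
lemma dropLast_flatMap_bar (L : List (List Char)) (hL : L ≠ []) :
    (L.flatMap (fun t => t ++ ['|'])).dropLast = PySem.Chars.join ['|'] L := by
  induction L with
  | nil => cases hL rfl
  | cons t ts ih =>
    cases ts with
    | nil => simp [PySem.Chars.join_singleton]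
    | cons t' ts' =>
      have hne : ((t' :: ts').flatMap (fun t => t ++ ['|'])) ≠ [] := by
        simp [List.flatMap_cons]
      rw [List.flatMap_cons, List.dropLast_append_of_ne_nil hne,
          ih (by simp), PySem.Chars.join_cons_cons]

-- the core identity: A's triple fold with its trailing bar dropped is the '|'-join of B's
-- recursive suffix expansion, for any lookup g with nonempty codon lists at the three keys
lemma core_eq (g : Char → List (List Char)) (a b c : Char)
    (h1 : g a ≠ []) (h2 : g b ≠ []) (h3 : g c ≠ []) :
    ((g a).foldl (fun r c1 => (g b).foldl (fun r c2 => (g c).foldl (fun r c3 =>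
        r ++ c1 ++ c2 ++ c3 ++ ['|']) r) r) ([] : List Char)).dropLast
    = PySem.Chars.join ['|']
        ((g a).flatMap (fun x => ((g b).flatMap (fun y => (g c).map (fun z => y ++ z))).map (fun t => x ++ t))) := by
  have hA : ((g a).foldl (fun r c1 => (g b).foldl (fun r c2 => (g c).foldl (fun r c3 =>
        r ++ c1 ++ c2 ++ c3 ++ ['|']) r) r) ([] : List Char))
      = ((g a).flatMap (fun x => ((g b).flatMap (fun y => (g c).map (fun z => y ++ z))).map (fun t => x ++ t))).flatMap
          (fun t => t ++ ['|']) := by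
    simp only [List.append_assoc, PySem.List.foldl_append_eq_flatMap, List.nil_append]
    simp [List.flatMap_assoc, List.map_flatMap, List.flatMap_map, List.map_map, Function.comp_def,
      List.append_assoc]
  have hne : ((g a).flatMap (fun x => ((g b).flatMap (fun y => (g c).map (fun z => y ++ z))).map (fun t => x ++ t))) ≠ [] := by
    obtain ⟨x, xs, hx⟩ := List.exists_cons_of_ne_nil h1
    obtain ⟨y, ys, hy⟩ := List.exists_cons_of_ne_nil h2
    obtain ⟨z, zs, hz⟩ := List.exists_cons_of_ne_nil h3
    simp [hx, hy, hz]
  rw [hA, dropLast_flatMap_bar _ hne]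

-- ===== VERDICT (by name: the statement is the Claim_ definition above) =====
theorem re_threecodons_spec : Claim_equal_re_threecodons := by
  intro aastr codontable _ hpre
  obtain ⟨hct, hlen, hkeys⟩ := hpre
  have hbeq : (codontable == "ctg") = false := beq_eq_false_iff_ne.mpr hct
  obtain ⟨c0, t0, h0⟩ := List.exists_cons_of_ne_nil (List.ne_nil_of_length_pos
    (show 0 < aastr.toList.length by omega))
  obtain ⟨c1, t1, h1⟩ := List.exists_cons_of_ne_nil (List.ne_nil_of_length_pos
    (show 0 < t0.length by simp [h0] at hlen; omega))
  obtain ⟨c2, t2, h2⟩ := List.exists_cons_of_ne_nil (List.ne_nil_of_length_pos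
    (show 0 < t1.length by simp [h0, h1] at hlen; omega))
  have hL : aastr.toList = c0 :: c1 :: c2 :: t2 := by rw [h0, h1, h2]
  rw [hL] at hkeys
  obtain ⟨hk0, hk1, hk2⟩ : c0 ∈ aaKeys ∧ c1 ∈ aaKeys ∧ c2 ∈ aaKeys := by
    simpa [List.contains_iff_mem] using hkeys
  unfold Spec_re_threecodons re_threecodons re_threecodons_alt
  simp only [hbeq, Bool.false_eq_true, if_false]
  simp only [PySem.Str.pyGet?, PySem.Chars.pyGet?_eq_listPyGet?, hL]
  have g0 : PySem.List.pyGet? (c0 :: c1 :: c2 :: t2) (0 : Int) = some c0 := by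
    simp only [PySem.List.pyGet?, PySem.List.pyIdx?]
    norm_num
    rw [if_pos (by omega : (0:Int) ≤ ↑t2.length + 1 + 1)]
    rfl
  have g1 : PySem.List.pyGet? (c0 :: c1 :: c2 :: t2) (1 : Int) = some c1 := by
    simp only [PySem.List.pyGet?, PySem.List.pyIdx?]
    norm_num
    rw [if_pos (by omega : (0:Int) ≤ ↑t2.length + 1)]
    rfl
  have g2 : PySem.List.pyGet? (c0 :: c1 :: c2 :: t2) (2 : Int) = some c2 := by
    simp only [PySem.List.pyGet?, PySem.List.pyIdx?]
    norm_num
    rw [if_pos (by omega : (2:Int) ≤ ↑t2.length + 1 + 1)]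
    rfl
  simp only [g0, g1, g2, Option.getD_some, PySem.List.slice_zero_start]
  rw [PySem.List.slice_to_neg_one]
  obtain ⟨e0, n0⟩ := alt_lookup c0 hk0
  obtain ⟨e1, n1⟩ := alt_lookup c1 hk1
  obtain ⟨e2, n2⟩ := alt_lookup c2 hk2
  have hexp : expandAlt codonTableAltStd [[c0], [c1], [c2]]
      = (PySem.Dict.getD codonTableStd c0 []).flatMap (fun x =>
          ((PySem.Dict.getD codonTableStd c1 []).flatMap (fun y =>
            (PySem.Dict.getD codonTableStd c2 []).map (fun z => y ++ z))).map (fun t => x ++ t)) := by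
    simp [expandAlt, e0, e1, e2]
  rw [hexp]
  exact congrArg String.ofList
    (core_eq (fun c => PySem.Dict.getD codonTableStd c []) c0 c1 c2 n0 n1 n2)
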